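-- pv_equiv track=rewrite | github.com/rangarajanps/projectEuler | python/problem36.py | isBinaryPalindrome
-- ===== SOURCE A (Python) =====
-- def isBinaryPalindrome(n):
--     numInBase2 = []
--     itr = 0
--     while n > 0:
--         numInBase2.append(n % 2)
--         n = n // 2
--         itr += 1
--
--     for i in range(0, len(numInBase2) // 2):
--         if numInBase2[i] != numInBase2[len(numInBase2) - i - 1]:
--             return False
--
--     return True
-- ===== SOURCE B (Python) =====
-- def isBinaryPalindrome(n):
--     rev = 0
--     temp = n
--     while temp > 0:
--         rev = rev * 2 + temp % 2
--         temp //= 2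
--     return n <= 0 or rev == n
-- ===== Notes on version B (the rewrite author's own statement) =====
-- stated objective: alternative
-- what changed: Instead of building a list of binary digits and comparing symmetric positions with a two-pointer scan, B folds the bits LSB-first into a single integer accumulator (the bit-reversal of n) and does one whole-value equality check rev == n.
import Mathlib
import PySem

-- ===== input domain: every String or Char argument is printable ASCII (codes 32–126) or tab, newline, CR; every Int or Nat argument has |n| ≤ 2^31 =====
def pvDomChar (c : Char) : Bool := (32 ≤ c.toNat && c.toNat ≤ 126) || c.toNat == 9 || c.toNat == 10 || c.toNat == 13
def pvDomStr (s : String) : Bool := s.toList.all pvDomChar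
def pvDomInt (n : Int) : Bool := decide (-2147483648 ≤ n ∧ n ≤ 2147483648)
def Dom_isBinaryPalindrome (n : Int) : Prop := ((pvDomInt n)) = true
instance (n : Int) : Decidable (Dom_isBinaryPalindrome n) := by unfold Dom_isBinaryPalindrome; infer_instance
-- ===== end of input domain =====

-- B replaces A's digit-list + two-pointer palindrome scan by a single integer
-- accumulator holding the bit-reversal of n, compared with n in one equality check.

-- ===== PORT A =====
-- the while loop: append n % 2, n //= 2 (itr is dead state and omitted)
def pvBuildBits (n : Int) (acc : List Int) : List Int :=
  if n > 0 then pvBuildBits (PySem.Int.floordiv n 2) (acc ++ [PySem.Int.mod n 2]) else acc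
termination_by n.toNat
decreasing_by
  have h2 : PySem.Int.floordiv n 2 = n / 2 := PySem.Int.floordiv_eq_ediv_of_pos (by omega)
  rw [h2]; omega

def isBinaryPalindrome (n : Int) : Bool :=
  let numInBase2 := pvBuildBits n []
  -- the for loop over range(0, len // 2) with early 'return False'
  (List.range (numInBase2.length / 2)).all (fun i =>
    numInBase2.getD i 0 == numInBase2.getD (numInBase2.length - i - 1) 0)

-- ===== PORT B =====
def pvRevLoop (temp rev : Int) : Int :=
  if temp > 0 then pvRevLoop (PySem.Int.floordiv temp 2) (rev * 2 + PySem.Int.mod temp 2) else rev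
termination_by temp.toNat
decreasing_by
  have h2 : PySem.Int.floordiv temp 2 = temp / 2 := PySem.Int.floordiv_eq_ediv_of_pos (by omega)
  rw [h2]; omega

def isBinaryPalindrome_alt (n : Int) : Bool :=
  decide (n ≤ 0) || (pvRevLoop n 0 == n)

-- ===== PRECONDITION & SPEC =====
def Spec_isBinaryPalindrome (n : Int) (out : Bool) : Prop := out = isBinaryPalindrome_alt n
instance (n : Int) (out : Bool) : Decidable (Spec_isBinaryPalindrome n out) := by unfold Spec_isBinaryPalindrome; infer_instance

-- ===== CLAIM (what is proved, stated in full; the proofs are below) =====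
def Claim_equal_isBinaryPalindrome : Prop := ∀ (n : Int), Dom_isBinaryPalindrome n → Spec_isBinaryPalindrome n (isBinaryPalindrome n)

-- ===== LEMMAS AND PROOFS =====

-- ===== VERDICT (by name: the statement is the Claim_ definition above) =====
-- bits of n, LSB first (proof-side characterisation of A's list)
def pvBits (n : Int) : List Int :=
  if n > 0 then (n % 2) :: pvBits (n / 2) else []
termination_by n.toNat
decreasing_by omega

-- value of a bit list read LSB-first
def pvVal (xs : List Int) : Int := xs.foldr (fun b r => b + 2 * r) 0

theorem pv_fd2 (n : Int) : PySem.Int.floordiv n 2 = n / 2 :=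
  PySem.Int.floordiv_eq_ediv_of_pos (by omega)

theorem pv_md2 (n : Int) : PySem.Int.mod n 2 = n % 2 :=
  PySem.Int.mod_eq_emod_of_pos (by omega)

theorem pvBuildBits_eq (n : Int) (acc : List Int) :
    pvBuildBits n acc = acc ++ pvBits n := by
  induction n using pvBits.induct generalizing acc with
  | case1 n h ih =>
    rw [pvBuildBits, pvBits]
    simp only [h, if_pos, pv_fd2, pv_md2, ih]
    simp
  | case2 n h =>
    rw [pvBuildBits, pvBits]
    simp [h]

theorem pvBits_digits (n : Int) : ∀ b ∈ pvBits n, b = 0 ∨ b = 1 := by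
  induction n using pvBits.induct with
  | case1 n h ih =>
    rw [pvBits]
    simp only [h, if_pos, List.mem_cons]
    rintro b (rfl | hb)
    · omega
    · exact ih b hb
  | case2 n h => rw [pvBits]; simp [h]

theorem pvVal_bits (n : Int) (h : 0 ≤ n) : pvVal (pvBits n) = n := by
  induction n using pvBits.induct with
  | case1 n hp ih =>
    rw [pvBits]
    simp only [hp, if_pos]
    have := ih (by omega)
    simp only [pvVal, List.foldr_cons] at this ⊢
    rw [this]
    omega
  | case2 n hp => rw [pvBits]; simp [hp, pvVal]; omega

theorem pvVal_append (xs : List Int) (b : Int) :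
    pvVal (xs ++ [b]) = pvVal xs + b * 2 ^ xs.length := by
  induction xs with
  | nil => simp [pvVal]
  | cons x t ih =>
    simp only [pvVal, List.cons_append, List.foldr_cons, List.length_cons] at *
    rw [ih]; ring

theorem pvRevLoop_eq (n : Int) : ∀ r : Int,
    pvRevLoop n r = r * 2 ^ (pvBits n).length + pvVal (pvBits n).reverse := by
  induction n using pvBits.induct with
  | case1 n hp ih =>
    intro r
    rw [pvRevLoop, pvBits]
    simp only [hp, if_pos, pv_fd2, pv_md2, List.length_cons, List.reverse_cons]
    rw [ih, pvVal_append]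
    simp only [List.length_reverse]
    ring
  | case2 n hp =>
    intro r
    rw [pvRevLoop, pvBits]
    simp [hp, pvVal]

theorem pvVal_nonneg (xs : List Int) (h : ∀ b ∈ xs, b = 0 ∨ b = 1) : 0 ≤ pvVal xs := by
  induction xs with
  | nil => simp [pvVal]
  | cons x t ih =>
    have hx := h x (by simp)
    have ht := ih (fun b hb => h b (by simp [hb]))
    simp only [pvVal, List.foldr_cons] at ht ⊢
    omega

theorem pvVal_inj (xs : List Int) : ∀ ys : List Int, xs.length = ys.length →
    (∀ b ∈ xs, b = 0 ∨ b = 1) → (∀ b ∈ ys, b = 0 ∨ b = 1) →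
    pvVal xs = pvVal ys → xs = ys := by
  induction xs with
  | nil => intro ys hl _ _ _; cases ys <;> simp_all
  | cons x t ih =>
    intro ys hl hx hy hv
    cases ys with
    | nil => simp at hl
    | cons y u =>
      have hx0 := hx x (by simp)
      have hy0 := hy y (by simp)
      have htn := pvVal_nonneg t (fun b hb => hx b (by simp [hb]))
      have hun := pvVal_nonneg u (fun b hb => hy b (by simp [hb]))
      simp only [pvVal, List.foldr_cons] at hv htn hun
      have hxy : x = y ∧ t.foldr (fun b r => b + 2 * r) 0 = u.foldr (fun b r => b + 2 * r) 0 := by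
        omega
      have := ih u (by simpa using hl) (fun b hb => hx b (by simp [hb]))
        (fun b hb => hy b (by simp [hb])) hxy.2
      simp [hxy.1, this]

theorem pvPal_iff (xs : List Int) :
    ((List.range (xs.length / 2)).all (fun i =>
      xs.getD i 0 == xs.getD (xs.length - i - 1) 0)) = true ↔ xs = xs.reverse := by
  simp only [List.all_eq_true, List.mem_range, beq_iff_eq]
  constructor
  · intro h
    apply List.ext_getElem (by simp)
    intro i hi hi'
    rw [List.getElem_reverse]
    by_cases hc : i < xs.length / 2
    · have := h i hc
      rw [List.getD_eq_getElem _ _ (by omega), List.getD_eq_getElem _ _ (by omega)] at this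
      simp only [show xs.length - 1 - i = xs.length - i - 1 from by omega]
      exact this
    · by_cases he : i = xs.length - 1 - i
      · simp only [show xs.length - 1 - i = i from by omega]
      · have hj : xs.length - 1 - i < xs.length / 2 := by omega
        have := h _ hj
        rw [List.getD_eq_getElem _ _ (by omega), List.getD_eq_getElem _ _ (by omega)] at this
        simp only [show xs.length - (xs.length - 1 - i) - 1 = i from by omega] at this
        simp only [show xs.length - 1 - i = xs.length - i - 1 from by omega] at this ⊢
        exact this.symm
  · intro h i hi
    have hg : xs.getD i 0 = xs.reverse.getD i 0 := by
      conv_lhs => rw [h]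
    rw [List.getD_eq_getElem _ _ (by omega),
        List.getD_eq_getElem _ _ (by simp; omega), List.getElem_reverse] at hg
    rw [List.getD_eq_getElem _ _ (by omega), List.getD_eq_getElem _ _ (by omega)]
    simpa only [show xs.length - 1 - i = xs.length - i - 1 from by omega] using hg

-- ===== VERDICT (by name: the statement is the Claim_ definition above) =====
theorem isBinaryPalindrome_spec : Claim_equal_isBinaryPalindrome := by
  intro n _
  unfold Spec_isBinaryPalindrome isBinaryPalindrome isBinaryPalindrome_alt
  simp only [pvBuildBits_eq, List.nil_append]
  by_cases hn : n ≤ 0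
  · rw [pvBits]
    simp [hn, show ¬ n > 0 by omega]
  · rw [Bool.eq_iff_iff]
    simp only [Bool.or_eq_true, decide_eq_true_eq, beq_iff_eq, pvPal_iff]
    constructor
    · intro h
      right
      rw [pvRevLoop_eq]
      have hrv : pvVal (pvBits n).reverse = pvVal (pvBits n) := by rw [← h]
      rw [hrv, pvVal_bits n (by omega)]
      simp
    · rintro (h | h)
      · omega
      · rw [pvRevLoop_eq] at h
        simp only [zero_mul, zero_add] at h
        have h2 : pvVal (pvBits n).reverse = pvVal (pvBits n) := by
          rw [pvVal_bits n (by omega)]; exact h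
        exact (pvVal_inj (pvBits n).reverse (pvBits n) (by simp)
          (fun b hb => pvBits_digits n b (List.mem_reverse.mp hb))
          (pvBits_digits n) h2).symm
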